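-- pv_equiv track=rewrite | github.com/EnriqueCerv/LeetCode-Practice | HR_MaxTransactions.py | maxTransactionsRec
-- ===== SOURCE A (Python) =====
-- def maxTransactionsRec(transactions, balance, idx):
--     n = len(transactions)
--     if idx == n or balance < 0:
--         return 0
--
--     if transactions[idx] >= 0:
--         return 1 + maxTransactionsRec(transactions, balance + transactions[idx], idx + 1)
--
--     else:
--         opt1 = maxTransactionsRec(transactions, balance, idx + 1)
--         if balance + transactions[idx] >= 0:
--             opt2 = 1 + maxTransactionsRec(transactions, balance + transactions[idx], idx + 1)
--             opt1 = max(opt1, opt2)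
--         return opt1
-- ===== SOURCE B (Python) =====
-- def maxTransactionsRec(transactions, balance, idx):
--     # Bottom-up DP over the suffix: thr[k] = minimal starting balance that
--     # allows completing k+1 transactions of the suffix (non-negative
--     # transactions are always taken, as in the task).  Answer = number of
--     # thresholds not exceeding the starting balance.
--     thr = []
--     for t in reversed(transactions[idx:]):
--         if t >= 0:
--             thr = [0] + [max(x - t, 0) for x in thr]
--         else:
--             new, prev = [], 0
--             for x in thr:
--                 new.append(min(x, prev - t))
--                 prev = x
--             new.append(prev - t)
--             thr = new
--     return sum(1 for x in thr if x <= balance)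
-- ===== Notes on version B (the rewrite author's own statement) =====
-- stated objective: alternative
-- what changed: Replaces A's top-down skip/take recursion by a bottom-up threshold DP over the suffix: thr[k] = minimal starting balance needed to complete k+1 transactions, built right-to-left in one pass; the answer is the number of thresholds <= balance.
-- outside the precondition, e.g. on maxTransactionsRec([5], 0, -1): A returns 2, B returns 1
import Mathlib
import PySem

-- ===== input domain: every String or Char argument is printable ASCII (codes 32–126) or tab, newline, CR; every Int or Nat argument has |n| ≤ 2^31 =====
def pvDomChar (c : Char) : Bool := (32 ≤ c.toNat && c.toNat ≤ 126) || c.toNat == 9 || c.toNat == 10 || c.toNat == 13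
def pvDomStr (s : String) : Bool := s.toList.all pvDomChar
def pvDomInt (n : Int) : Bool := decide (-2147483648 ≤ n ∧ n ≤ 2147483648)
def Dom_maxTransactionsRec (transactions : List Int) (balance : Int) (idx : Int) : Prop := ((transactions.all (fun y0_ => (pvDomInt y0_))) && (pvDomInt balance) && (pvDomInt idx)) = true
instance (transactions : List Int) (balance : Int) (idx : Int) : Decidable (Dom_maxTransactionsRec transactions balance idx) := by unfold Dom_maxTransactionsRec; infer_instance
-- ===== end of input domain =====

-- B re-implements the count as a bottom-up threshold DP over the suffix (minimal
-- starting balance per achievable transaction count) instead of A's skip/take recursion.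

-- ===== PORT A =====
-- termination lemma for the port's recursion (cited by name in decreasing_by)
theorem pvA_dec (transactions : List Int) (idx t : Int)
    (h : PySem.List.pyGet? transactions idx = some t) :
    (((transactions.length : Int) + 1) - (idx + 1)).toNat
      < (((transactions.length : Int) + 1) - idx).toNat := by
  have hin : PySem.Raise.InRange transactions.length idx := by
    by_contra hc
    rw [← PySem.List.pyGet?_eq_none_iff] at hc
    simp [hc] at h
  simp [PySem.Raise.InRange] at hin
  omega

def maxTransactionsRec (transactions : List Int) (balance : Int) (idx : Int) : Int :=
  if idx = (transactions.length : Int) ∨ balance < 0 then 0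
  else
    match h : PySem.List.pyGet? transactions idx with
    | none => 0  -- transactions[idx] raises IndexError in Python; outside Pre_
    | some t =>
      if t ≥ 0 then 1 + maxTransactionsRec transactions (balance + t) (idx + 1)
      else
        let opt1 := maxTransactionsRec transactions balance (idx + 1)
        if balance + t ≥ 0 then
          max opt1 (1 + maxTransactionsRec transactions (balance + t) (idx + 1))
        else opt1
termination_by ((transactions.length : Int) + 1 - idx).toNat
decreasing_by
  all_goals exact pvA_dec transactions idx t h

-- ===== PORT B =====
-- the inner 'for x in thr' loop of Source B carrying prev
def pvNegStep (t : Int) : List Int → Int → List Int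
  | [], prev => [prev - t]
  | x :: xs, prev => min x (prev - t) :: pvNegStep t xs x

-- one iteration of Source B's main loop
def pvStep (t : Int) (thr : List Int) : List Int :=
  if t ≥ 0 then 0 :: thr.map (fun x => max (x - t) 0)
  else pvNegStep t thr 0

def maxTransactionsRec_alt (transactions : List Int) (balance : Int) (idx : Int) : Int :=
  let thr := ((PySem.List.slice transactions (some idx) none).reverse).foldl
      (fun acc t => pvStep t acc) []
  ((thr.countP (fun x => decide (x ≤ balance))) : Int)

-- ===== PRECONDITION & SPEC =====
-- Pre_ excludes exactly the inputs with balance ≥ 0 and idx outside [0, len]: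
-- for idx > len or idx < -len A raises IndexError, and for -len ≤ idx < 0 A's
-- value comes from Python's negative-index wraparound (it reads the last -idx
-- elements and then the whole list again) — an artefact of indexing, which B
-- (reading the slice transactions[idx:]) does not reproduce.
def Pre_maxTransactionsRec (transactions : List Int) (balance : Int) (idx : Int) : Prop :=
  balance < 0 ∨ (0 ≤ idx ∧ idx ≤ (transactions.length : Int))
instance (transactions : List Int) (balance : Int) (idx : Int) : Decidable (Pre_maxTransactionsRec transactions balance idx) := by unfold Pre_maxTransactionsRec; infer_instance

def pvWitness_maxTransactionsRec : List Int × Int × Int := ([1, -1], 0, 0)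

def Spec_maxTransactionsRec (transactions : List Int) (balance : Int) (idx : Int) (out : Int) : Prop := out = maxTransactionsRec_alt transactions balance idx
instance (transactions : List Int) (balance : Int) (idx : Int) (out : Int) : Decidable (Spec_maxTransactionsRec transactions balance idx out) := by unfold Spec_maxTransactionsRec; infer_instance

-- ===== CLAIM (what is proved, stated in full; the proofs are below) =====
def Claim_equal_maxTransactionsRec : Prop := ∀ (transactions : List Int) (balance : Int) (idx : Int), Dom_maxTransactionsRec transactions balance idx → Pre_maxTransactionsRec transactions balance idx → Spec_maxTransactionsRec transactions balance idx (maxTransactionsRec transactions balance idx)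

-- ===== LEMMAS AND PROOFS =====

-- structural version of A's recursion on the suffix list
def pvF : List Int → Int → Int
  | [], _ => 0
  | t :: r, b =>
    if b < 0 then 0
    else if t ≥ 0 then 1 + pvF r (b + t)
    else if b + t ≥ 0 then max (pvF r b) (1 + pvF r (b + t)) else pvF r b

def pvThr (l : List Int) : List Int := l.foldr pvStep []

-- every element produced by pvNegStep is ≥ q when q bounds prev and the input below
theorem pvNegStep_lb (t q : Int) : ∀ (R : List Int) (prev : Int), t < 0 → q ≤ prev →
    (∀ y ∈ R, q ≤ y) → ∀ z ∈ pvNegStep t R prev, q ≤ z := by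
  intro R
  induction R with
  | nil => intro prev ht hp _ z hz; simp [pvNegStep] at hz; omega
  | cons x xs ih =>
    intro prev ht hp hR z hz
    simp [pvNegStep] at hz
    rcases hz with hz | hz
    · have hx : q ≤ x := hR x (by simp)
      subst hz; omega
    · exact ih x ht (hR x (by simp)) (fun y hy => hR y (by simp [hy])) z hz

theorem pvNegStep_sorted (t : Int) : ∀ (R : List Int) (prev : Int), t < 0 →
    R.Pairwise (· ≤ ·) → (pvNegStep t R prev).Pairwise (· ≤ ·) := by
  intro R
  induction R with
  | nil => intro prev _ _; simp [pvNegStep]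
  | cons x xs ih =>
    intro prev ht hs
    rw [List.pairwise_cons] at hs
    simp only [pvNegStep, List.pairwise_cons]
    refine ⟨?_, ih x ht hs.2⟩
    intro z hz
    exact pvNegStep_lb t (min x (prev - t)) xs x ht (min_le_left _ _)
      (fun y hy => le_trans (min_le_left _ _) (hs.1 y hy)) z hz

theorem pvStep_nonneg (t : Int) (R : List Int) (hR : ∀ y ∈ R, 0 ≤ y) :
    ∀ z ∈ pvStep t R, 0 ≤ z := by
  intro z hz
  unfold pvStep at hz
  split at hz
  · simp at hz
    rcases hz with hz | ⟨x, _, hz⟩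
    · omega
    · omega
  · exact pvNegStep_lb t 0 R 0 (by omega) le_rfl hR z hz

theorem pvStep_sorted (t : Int) (R : List Int) (hs : R.Pairwise (· ≤ ·))
    (hR : ∀ y ∈ R, 0 ≤ y) : (pvStep t R).Pairwise (· ≤ ·) := by
  unfold pvStep
  split
  · rw [List.pairwise_cons]
    constructor
    · intro z hz
      simp at hz
      obtain ⟨x, _, hz⟩ := hz
      omega
    · exact List.Pairwise.map _ (fun a b h => max_le_max (by omega) le_rfl) hs
  · exact pvNegStep_sorted t R 0 (by omega) hs

theorem pvThr_nonneg (l : List Int) : ∀ z ∈ pvThr l, 0 ≤ z := by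
  induction l with
  | nil => simp [pvThr]
  | cons t r ih => exact pvStep_nonneg t (pvThr r) ih

theorem pvThr_sorted (l : List Int) : (pvThr l).Pairwise (· ≤ ·) := by
  induction l with
  | nil => simp [pvThr]
  | cons t r ih => exact pvStep_sorted t (pvThr r) ih (pvThr_nonneg r)

-- counting lemmas
theorem cnt_mono (l : List Int) (b b' : Int) (h : b' ≤ b) :
    l.countP (fun x => decide (x ≤ b')) ≤ l.countP (fun x => decide (x ≤ b)) := by
  apply List.countP_mono_left
  intro x _ hx
  simp at hx ⊢; omega

theorem cnt_zero_of_lt (l : List Int) (b : Int) (h : ∀ x ∈ l, b < x) :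
    l.countP (fun x => decide (x ≤ b)) = 0 := by
  rw [List.countP_eq_zero]
  intro x hx
  simp; exact h x hx

-- the key counting identity for the negative-transaction step
theorem pvNegStep_count (t : Int) : ∀ (R : List Int) (prev b : Int), t < 0 →
    R.Pairwise (· ≤ ·) → (∀ y ∈ R, prev ≤ y) →
    (pvNegStep t R prev).countP (fun x => decide (x ≤ b)) =
      max (R.countP (fun x => decide (x ≤ b)))
          ((if prev - t ≤ b then 1 else 0) + R.countP (fun x => decide (x ≤ b + t))) := by
  intro R
  induction R with
  | nil =>
    intro prev b ht _ _
    simp [pvNegStep, List.countP_cons]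
  | cons x xs ih =>
    intro prev b ht hs hlb
    rw [List.pairwise_cons] at hs
    have hx : prev ≤ x := hlb x (by simp)
    have cle : xs.countP (fun y => decide (y ≤ b + t)) ≤ xs.countP (fun y => decide (y ≤ b)) :=
      cnt_mono xs b (b + t) (by omega)
    have hz1 : ¬ x ≤ b → xs.countP (fun y => decide (y ≤ b)) = 0 := fun h =>
      cnt_zero_of_lt xs b (fun y hy => lt_of_lt_of_le (by omega) (hs.1 y hy))
    have hz2 : ¬ x ≤ b + t → xs.countP (fun y => decide (y ≤ b + t)) = 0 := fun h =>
      cnt_zero_of_lt xs (b + t) (fun y hy => lt_of_lt_of_le (by omega) (hs.1 y hy))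
    simp only [pvNegStep, List.countP_cons]
    rw [ih x b ht hs.2 hs.1]
    split_ifs <;> simp only [decide_eq_true_eq] at * <;> omega

-- pvF equals counting thresholds
theorem pvF_eq_cnt (l : List Int) : ∀ b : Int,
    pvF l b = ((pvThr l).countP (fun x => decide (x ≤ b)) : Int) := by
  induction l with
  | nil => intro b; simp [pvF, pvThr]
  | cons t r ih =>
    intro b
    have hthr : pvThr (t :: r) = pvStep t (pvThr r) := rfl
    by_cases hb : b < 0
    · have : (pvThr (t :: r)).countP (fun x => decide (x ≤ b)) = 0 := by
        apply cnt_zero_of_lt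
        intro x hx
        have := pvThr_nonneg (t :: r) x hx
        omega
      simp [pvF, hb, this]
    · by_cases htp : t ≥ 0
      · -- positive step: 0 :: map (max (·-t) 0)
        have hmap : ((pvThr r).map (fun x => max (x - t) 0)).countP (fun x => decide (x ≤ b))
            = (pvThr r).countP (fun x => decide (x ≤ b + t)) := by
          rw [List.countP_map]
          apply List.countP_congr
          intro x _
          simp [Function.comp]
          omega
        simp only [pvF, hb, if_false, htp, if_true, hthr, pvStep, List.countP_cons]
        rw [hmap, ih (b + t)]
        have : (decide ((0:Int) ≤ b)) = true := by simp; omega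
        simp [this]
        omega
      · -- negative step
        have hthr2 : pvThr (t :: r) = pvNegStep t (pvThr r) 0 := by
          simp [pvThr, pvStep, htp]
        have hkey := pvNegStep_count t (pvThr r) 0 b (by omega) (pvThr_sorted r) (pvThr_nonneg r)
        have hc2 : b + t < 0 → (pvThr r).countP (fun x => decide (x ≤ b + t)) = 0 := by
          intro h
          apply cnt_zero_of_lt
          intro x hx
          have := pvThr_nonneg r x hx
          omega
        simp only [pvF]
        rw [hthr2, hkey, ih b, ih (b + t)]
        split_ifs <;> (try push_cast) <;> omega

-- A's port equals pvF on the dropped suffix (for 0 ≤ idx)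
theorem bridgeA (transactions : List Int) : ∀ (k : Nat) (idx b : Int), 0 ≤ idx →
    transactions.length - idx.toNat = k →
    maxTransactionsRec transactions b idx = pvF (transactions.drop idx.toNat) b := by
  intro k
  induction k with
  | zero =>
    intro idx b hidx hk
    have hge : transactions.length ≤ idx.toNat := by omega
    rw [List.drop_eq_nil_of_le hge]
    rw [maxTransactionsRec]
    by_cases he : idx = (transactions.length : Int)
    · simp [he, pvF]
    · simp only [he, false_or]
      by_cases hb : b < 0
      · simp [hb, pvF]
      · have hnone : PySem.List.pyGet? transactions idx = none := by
          rw [PySem.List.pyGet?_eq_none_iff]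
          simp [PySem.Raise.InRange]
          omega
        rw [if_neg hb]
        split
        · simp [pvF]
        · rename_i t heq
          rw [hnone] at heq
          simp at heq
  | succ k ih =>
    intro idx b hidx hk
    have hlt : idx.toNat < transactions.length := by omega
    have hlti : idx < (transactions.length : Int) := by omega
    have hdrop : transactions.drop idx.toNat
        = transactions[idx.toNat] :: transactions.drop (idx.toNat + 1) :=
      List.drop_eq_getElem_cons hlt
    have hsucc : (idx + 1).toNat = idx.toNat + 1 := by omega
    have hsome : PySem.List.pyGet? transactions idx = some transactions[idx.toNat] :=
      PySem.List.pyGet?_eq_some_getElem transactions hidx (by exact_mod_cast hlti)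
    rw [maxTransactionsRec]
    have hne : ¬ idx = (transactions.length : Int) := by omega
    rw [hdrop]
    by_cases hb : b < 0
    · simp [hne, hb, pvF]
    · rw [if_neg (by omega)]
      split
      · rename_i heq
        rw [hsome] at heq
        simp at heq
      · rename_i t heq
        rw [hsome] at heq
        injection heq with heq2
        subst heq2
        have ih1 := ih (idx + 1) (b + transactions[idx.toNat]) (by omega) (by omega)
        have ih2 := ih (idx + 1) b (by omega) (by omega)
        rw [hsucc] at ih1 ih2
        by_cases htp : transactions[idx.toNat] ≥ 0
        · simp [pvF, hb, htp, ih1]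
        · by_cases hbt : b + transactions[idx.toNat] ≥ 0
          · simp [pvF, hb, htp, hbt, ih1, ih2]
          · simp [pvF, hb, htp, hbt, ih2]

-- B's port equals counting the thresholds of the slice
theorem bridgeB (transactions : List Int) (b idx : Int) :
    maxTransactionsRec_alt transactions b idx
      = ((pvThr (PySem.List.slice transactions (some idx) none)).countP
          (fun x => decide (x ≤ b)) : Int) := by
  unfold maxTransactionsRec_alt pvThr
  rw [List.foldl_reverse]

-- A returns 0 whenever balance < 0
theorem A_neg (transactions : List Int) (b idx : Int) (hb : b < 0) :
    maxTransactionsRec transactions b idx = 0 := by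
  rw [maxTransactionsRec]
  simp [hb]

-- ===== VERDICT (by name: the statement is the Claim_ definition above) =====
theorem maxTransactionsRec_spec : Claim_equal_maxTransactionsRec := by
  intro transactions balance idx _ hpre
  unfold Spec_maxTransactionsRec
  rw [bridgeB]
  by_cases hb : balance < 0
  · rw [A_neg transactions balance idx hb]
    have : (pvThr (PySem.List.slice transactions (some idx) none)).countP
        (fun x => decide (x ≤ balance)) = 0 := by
      apply cnt_zero_of_lt
      intro x hx
      have := pvThr_nonneg _ x hx
      omega
    simp [this]
  · rcases hpre with hpre | ⟨h0, _⟩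
    · omega
    · rw [PySem.List.slice_from transactions h0]
      rw [bridgeA transactions (transactions.length - idx.toNat) idx balance h0 rfl]
      exact pvF_eq_cnt _ balance
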